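-- pv_equiv track=rewrite | github.com/SantiagoZp123/ProyectoS | main.py | crear_mapa
-- ===== SOURCE A (Python) =====
-- def crear_mapa(columnas):
--     '''
--     Genera un mapa de puestos Vip y General.
--     Divide el mapa en sublistas de 10 columnas cada una y coloca cada sublista una debajo de la otra.
--     '''
--     if columnas < 10:
--         columnas = 10
--
--     mapa = []
--     fila = []
--
--     for i in range(columnas):
--         fila.append(False)
--         if len(fila) == 10:
--             mapa.append(fila)
--             fila = []
--
--     if fila:  # Si hay columnas restantes que no completan una fila de 10, se agregan al mapa
--         mapa.append(fila)
--
--     return mapa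
-- ===== SOURCE B (Python) =====
-- def crear_mapa(columnas):
--     if columnas < 10:
--         columnas = 10
--     full, rem = divmod(columnas, 10)
--     mapa = [[False] * 10 for _ in range(full)]
--     if rem:
--         mapa.append([False] * rem)
--     return mapa
-- ===== Notes on version B (the rewrite author's own statement) =====
-- stated objective: simpler
-- what changed: Replaces the element-by-element counting loop with a running 'fila' buffer by a divmod computing the row counts, building the full rows with a comprehension and appending one remainder row.
import Mathlib
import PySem

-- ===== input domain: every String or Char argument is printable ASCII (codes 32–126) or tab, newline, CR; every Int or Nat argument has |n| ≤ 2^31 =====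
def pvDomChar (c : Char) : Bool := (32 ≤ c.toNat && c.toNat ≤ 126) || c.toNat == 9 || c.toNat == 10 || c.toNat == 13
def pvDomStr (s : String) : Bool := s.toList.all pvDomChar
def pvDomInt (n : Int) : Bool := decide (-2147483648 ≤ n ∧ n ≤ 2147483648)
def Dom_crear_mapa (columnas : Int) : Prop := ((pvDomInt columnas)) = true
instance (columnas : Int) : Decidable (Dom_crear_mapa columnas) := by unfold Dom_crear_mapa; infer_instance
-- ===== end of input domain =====

-- B replaces A's element-by-element counting loop by a divmod row-count computation; objective: simpler.

-- ===== PORT A =====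
def crear_mapa (columnas : Int) : List (List Bool) :=
  let c := if columnas < 10 then 10 else columnas
  let st := (PySem.List.pyRange 0 c 1).foldl
    (fun (st : List (List Bool) × List Bool) _ =>
      let fila := st.2 ++ [false]
      if fila.length = 10 then (st.1 ++ [fila], ([] : List Bool)) else (st.1, fila))
    ([], [])
  if st.2 ≠ [] then st.1 ++ [st.2] else st.1

-- ===== PORT B =====
def crear_mapa_alt (columnas : Int) : List (List Bool) :=
  let c := if columnas < 10 then 10 else columnas
  let full := PySem.Int.floordiv c 10
  let rem := PySem.Int.mod c 10
  let mapa := (PySem.List.pyRange 0 full 1).map (fun _ => List.replicate 10 false)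
  if rem ≠ 0 then mapa ++ [List.replicate rem.toNat false] else mapa

-- ===== PRECONDITION & SPEC =====
def Spec_crear_mapa (columnas : Int) (out : List (List Bool)) : Prop := out = crear_mapa_alt columnas
instance (columnas : Int) (out : List (List Bool)) : Decidable (Spec_crear_mapa columnas out) := by unfold Spec_crear_mapa; infer_instance

-- ===== CLAIM (what is proved, stated in full; the proofs are below) =====
def Claim_equal_crear_mapa : Prop := ∀ (columnas : Int), Dom_crear_mapa columnas → Spec_crear_mapa columnas (crear_mapa columnas)

-- ===== LEMMAS AND PROOFS =====

-- The loop invariant of A: running the loop body over any list, starting with a partial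
-- row of k < 10 seats, yields exactly the full rows plus a remainder row, counted by divmod.
theorem crear_mapa_fold_inv (l : List Int) (m : List (List Bool)) (k : Nat) (hk : k < 10) :
    l.foldl
      (fun (st : List (List Bool) × List Bool) _ =>
        let fila := st.2 ++ [false]
        if fila.length = 10 then (st.1 ++ [fila], ([] : List Bool)) else (st.1, fila))
      (m, List.replicate k false) =
    (m ++ List.replicate ((k + l.length) / 10) (List.replicate 10 false),
     List.replicate ((k + l.length) % 10) false) := by
  induction l generalizing m k with
  | nil =>
    simp only [List.foldl_nil, List.length_nil]
    rw [Nat.div_eq_of_lt (by omega), Nat.mod_eq_of_lt (by omega)]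
    simp
  | cons x t ih =>
    simp only [List.foldl_cons, List.length_cons]
    have hfila : List.replicate k false ++ [false] = List.replicate (k + 1) false := by
      rw [List.replicate_succ']
    by_cases h10 : k + 1 = 10
    · simp only [hfila, List.length_replicate, h10, if_true]
      have := ih (m ++ [List.replicate 10 false]) 0 (by omega)
      simp only [List.replicate_zero] at this
      rw [this]
      have hd : (k + (t.length + 1)) / 10 = t.length / 10 + 1 := by omega
      have hm : (k + (t.length + 1)) % 10 = (0 + t.length) % 10 := by omega
      rw [hd, hm]
      simp [List.replicate_succ, List.append_assoc]
    · simp only [hfila, List.length_replicate, if_neg h10]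
      have := ih m (k + 1) (by omega)
      rw [this]
      have hd : k + 1 + t.length = k + (t.length + 1) := by omega
      rw [hd]

theorem map_const_replicate (l : List Int) (x : List Bool) :
    l.map (fun _ => x) = List.replicate l.length x := by
  induction l with
  | nil => simp
  | cons a t ih => simp [List.replicate_succ, ih]

-- ===== VERDICT (by name: the statement is the Claim_ definition above) =====
theorem crear_mapa_spec : Claim_equal_crear_mapa := by
  intro columnas _
  unfold Spec_crear_mapa crear_mapa crear_mapa_alt
  set c : Int := if columnas < 10 then 10 else columnas with hc
  have hc10 : 10 ≤ c := by rw [hc]; split <;> omega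
  obtain ⟨n, hn⟩ : ∃ n : Nat, c = (n : Int) := ⟨c.toNat, by omega⟩
  simp only [hn]
  -- A's side: apply the loop invariant with k = 0
  have hA := crear_mapa_fold_inv (PySem.List.pyRange 0 (n : Int) 1) [] 0 (by omega)
  simp only [List.replicate_zero, List.nil_append, PySem.List.length_pyRange_one] at hA
  have hlen : ((n : Int) - 0).toNat = n := by omega
  rw [hlen] at hA
  rw [hA]
  -- B's side: divmod and the comprehension
  have hfd : PySem.Int.floordiv (n : Int) 10 = ((n / 10 : Nat) : Int) := by
    exact_mod_cast PySem.Int.floordiv_natCast n 10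
  have hmd : PySem.Int.mod (n : Int) 10 = ((n % 10 : Nat) : Int) := by
    exact_mod_cast PySem.Int.mod_natCast n 10
  rw [hfd, hmd, map_const_replicate, PySem.List.length_pyRange_one]
  have hlen2 : (((n / 10 : Nat) : Int) - 0).toNat = n / 10 := by omega
  rw [hlen2]
  simp only [Nat.zero_add]
  by_cases hz : n % 10 = 0
  · simp [hz]
  · rw [if_pos (by simp [hz]), if_pos (by exact_mod_cast hz)]
    have : (((n % 10 : Nat) : Int)).toNat = n % 10 := by omega
    rw [this]
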